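-- pv_equiv track=rewrite | github.com/eunjiyeom-kurly/rec_emb_template_test | eda/bq_eda.py | detect_date_col
-- ===== SOURCE A (Python) =====
-- def detect_date_col(bq_schema: dict) -> str | None:
--     """BQ 스키마에서 날짜 필터에 사용할 컬럼을 자동 탐지한다.
--
--     우선순위: pdt > DATE 타입 > DATETIME 타입 > TIMESTAMP 타입
--     """
--     if "pdt" in bq_schema:
--         return "pdt"
--
--     # delete 관련 컬럼은 제외
--     _EXCLUDE_PATTERNS = {"delete", "deleted", "expire", "expired"}
--
--     def _is_excluded(col_name: str) -> bool:
--         col_lower = col_name.lower()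
--         return any(pat in col_lower for pat in _EXCLUDE_PATTERNS)
--
--     # CDC 테이블은 timestamp 컬럼이 가장 적합 (CDC 이벤트 시각)
--     if "timestamp" in bq_schema and bq_schema["timestamp"] == "TIMESTAMP":
--         return "timestamp"
--
--     priority = {"DATE": 1, "DATETIME": 2, "TIMESTAMP": 3}
--     candidates = [
--         (col, priority[bq_type])
--         for col, bq_type in bq_schema.items()
--         if bq_type in priority and not _is_excluded(col)
--     ]
--     if candidates:
--         candidates.sort(key=lambda x: x[1])
--         return candidates[0][0]
--     return None
-- ===== SOURCE B (Python) =====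
-- def detect_date_col(bq_schema: dict) -> str | None:
--     """BQ 스키마에서 날짜 필터에 사용할 컬럼을 자동 탐지한다.
--
--     우선순위: pdt > DATE 타입 > DATETIME 타입 > TIMESTAMP 타입
--     """
--     if "pdt" in bq_schema:
--         return "pdt"
--     if bq_schema.get("timestamp") == "TIMESTAMP":
--         return "timestamp"
--
--     def _usable(col_name: str) -> bool:
--         col_lower = col_name.lower()
--         # "deleted"/"expired" are already covered by the two stems
--         return "delete" not in col_lower and "expire" not in col_lower
--
--     # priority tiers, best first: first matching column in dict order wins
--     for tier in ("DATE", "DATETIME", "TIMESTAMP"):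
--         for col, bq_type in bq_schema.items():
--             if bq_type == tier and _usable(col):
--                 return col
--     return None
-- ===== Notes on version B (the rewrite author's own statement) =====
-- stated objective: simpler
-- what changed: Replaces the build-all-candidates list comprehension plus stable sort-by-priority with a tiered scan: for each type in (DATE, DATETIME, TIMESTAMP) return the first non-excluded column of that type in dict order, with early exit; the 4-pattern exclusion set collapses to its two stems 'delete'/'expire'.
import Mathlib
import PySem

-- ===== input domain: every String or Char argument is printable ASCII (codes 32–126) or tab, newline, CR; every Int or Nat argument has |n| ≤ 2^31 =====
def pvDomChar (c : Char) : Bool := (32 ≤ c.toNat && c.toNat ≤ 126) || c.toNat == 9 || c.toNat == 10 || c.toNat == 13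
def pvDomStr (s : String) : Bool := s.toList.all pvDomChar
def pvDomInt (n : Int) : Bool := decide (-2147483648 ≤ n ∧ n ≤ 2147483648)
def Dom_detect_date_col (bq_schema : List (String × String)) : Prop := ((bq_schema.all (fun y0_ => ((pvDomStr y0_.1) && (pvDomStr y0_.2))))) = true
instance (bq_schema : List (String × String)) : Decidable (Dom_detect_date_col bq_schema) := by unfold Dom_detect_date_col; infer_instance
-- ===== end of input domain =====

-- B replaces A's build-all-candidates + stable sort by a tiered first-match scan
-- (DATE, then DATETIME, then TIMESTAMP) with early exit: simpler, same cost.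

-- ===== PORT A =====
-- _is_excluded: any exclusion pattern occurs in the lowercased column name
def pvIsExcluded (col : String) : Bool :=
  (PySem.Set.ofList ["delete", "deleted", "expire", "expired"]).any
    (fun pat => PySem.Str.isIn pat (PySem.Str.lower col))

-- the local 'priority' dict literal
def pvPriority : PySem.Dict String Int :=
  PySem.Dict.ofList [("DATE", 1), ("DATETIME", 2), ("TIMESTAMP", 3)]

-- the candidates list comprehension
def pvCand (items : List (String × String)) : List (String × Int) :=
  items.filterMap (fun p =>
    if pvPriority.contains p.2 && !pvIsExcluded p.1 then some (p.1, pvPriority.getD p.2 0)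
    else none)

def detect_date_col (bq_schema : List (String × String)) : Option String :=
  let d := PySem.Dict.ofList bq_schema
  if d.contains "pdt" then some "pdt"
  else if d.contains "timestamp" && (d.getD "timestamp" "" == "TIMESTAMP") then some "timestamp"
  else
    let candidates := pvCand d.items
    match PySem.List.sorted candidates (fun x => x.2) with
    | [] => none
    | c :: _ => some c.1

-- ===== PORT B =====
-- _usable: neither stem "delete" nor "expire" occurs in the lowercased column name
def pvUsable (col : String) : Bool :=
  let col_lower := PySem.Str.lower col
  !(PySem.Str.isIn "delete" col_lower) && !(PySem.Str.isIn "expire" col_lower)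

def detect_date_col_alt (bq_schema : List (String × String)) : Option String :=
  let d := PySem.Dict.ofList bq_schema
  if d.contains "pdt" then some "pdt"
  else if d.get? "timestamp" == some "TIMESTAMP" then some "timestamp"
  else
    ["DATE", "DATETIME", "TIMESTAMP"].findSome? (fun tier =>
      (d.items.find? (fun p => p.2 == tier && pvUsable p.1)).map (fun p => p.1))

-- ===== PRECONDITION & SPEC =====
def Spec_detect_date_col (bq_schema : List (String × String)) (out : Option String) : Prop := out = detect_date_col_alt bq_schema
instance (bq_schema : List (String × String)) (out : Option String) : Decidable (Spec_detect_date_col bq_schema out) := by unfold Spec_detect_date_col; infer_instance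

-- ===== CLAIM (what is proved, stated in full; the proofs are below) =====
def Claim_equal_detect_date_col : Prop := ∀ (bq_schema : List (String × String)), Dom_detect_date_col bq_schema → Spec_detect_date_col bq_schema (detect_date_col bq_schema)

-- ===== LEMMAS AND PROOFS =====

-- "deleted"/"expired" are substrings containing the stems, so A's 4-pattern test is B's 2-stem test
lemma pv_excl_eq (col : String) : pvIsExcluded col = !pvUsable col := by
  have h2 : PySem.Str.isIn "deleted" (PySem.Str.lower col) = true →
      PySem.Str.isIn "delete" (PySem.Str.lower col) = true := by
    simp only [PySem.Str.isIn_iff_infix]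
    exact fun h => List.IsInfix.trans (by decide) h
  have h4 : PySem.Str.isIn "expired" (PySem.Str.lower col) = true →
      PySem.Str.isIn "expire" (PySem.Str.lower col) = true := by
    simp only [PySem.Str.isIn_iff_infix]
    exact fun h => List.IsInfix.trans (by decide) h
  simp only [pvIsExcluded, pvUsable]
  have hset : PySem.Set.ofList ["delete", "deleted", "expire", "expired"]
      = ["delete", "deleted", "expire", "expired"] := by decide
  rw [hset]
  simp only [List.any_cons, List.any_nil, Bool.or_false]
  cases hA : PySem.Str.isIn "delete" (PySem.Str.lower col) <;>
    cases hB : PySem.Str.isIn "expire" (PySem.Str.lower col)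
  · have e2 : PySem.Str.isIn "deleted" (PySem.Str.lower col) = false := by
      cases hc : PySem.Str.isIn "deleted" (PySem.Str.lower col)
      · rfl
      · exact absurd (h2 hc) (by simp only [hA]; decide)
    have e4 : PySem.Str.isIn "expired" (PySem.Str.lower col) = false := by
      cases hc : PySem.Str.isIn "expired" (PySem.Str.lower col)
      · rfl
      · exact absurd (h4 hc) (by simp only [hB]; decide)
    rw [e2, e4]
    decide
  · simp
  · simp
  · simp

-- the second early return: "timestamp" in d and d["timestamp"]=="TIMESTAMP"  ⟺  d.get("timestamp")=="TIMESTAMP"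
lemma pv_ts_eq (d : PySem.Dict String String) :
    (d.contains "timestamp" && (d.getD "timestamp" "" == "TIMESTAMP"))
      = (d.get? "timestamp" == some "TIMESTAMP") := by
  rw [PySem.Dict.contains_eq_isSome_get?, PySem.Dict.getD_eq_get?_getD]
  cases h : d.get? "timestamp" <;> simp

lemma pv_insertBy_append_left {α : Type} (before : α → α → Bool) (x : α) (l1 l2 : List α)
    (h : ∀ y ∈ l1, before x y = false) :
    PySem.List.insertBy before x (l1 ++ l2) = l1 ++ PySem.List.insertBy before x l2 := by
  induction l1 with
  | nil => simp
  | cons a t ih =>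
    have ha : before x a = false := h a (by simp)
    rw [show PySem.List.insertBy before x ((a :: t) ++ l2)
          = if before x a then x :: (a :: t) ++ l2 else a :: PySem.List.insertBy before x (t ++ l2)
        from rfl, ha]
    simp only [Bool.false_eq_true, if_false, List.cons_append]
    rw [ih (fun y hy => h y (by simp [hy]))]

lemma pv_insertBy_all_before {α : Type} (before : α → α → Bool) (x : α) (l : List α)
    (h : ∀ y ∈ l, before x y = true) :
    PySem.List.insertBy before x l = x :: l := by
  cases l with
  | nil => rfl
  | cons a t =>
    have ha : before x a = true := h a (by simp)
    rw [show PySem.List.insertBy before x (a :: t)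
          = if before x a then x :: a :: t else a :: PySem.List.insertBy before x t from rfl, ha]
    simp

-- stable sort of a list whose keys all lie in {1,2,3} is the concatenation of the key-filters
lemma pv_sorted_decomp (l : List (String × Int))
    (h : ∀ p ∈ l, p.2 = 1 ∨ p.2 = 2 ∨ p.2 = 3) :
    PySem.List.sorted l (fun x => x.2)
      = (l.filter (fun p => p.2 == (1 : Int)) ++ l.filter (fun p => p.2 == (2 : Int)))
          ++ l.filter (fun p => p.2 == (3 : Int)) := by
  induction l using List.reverseRecOn with
  | nil => rfl
  | append_singleton l x ih =>
    have hl : ∀ p ∈ l, p.2 = 1 ∨ p.2 = 2 ∨ p.2 = 3 :=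
      fun p hp => h p (List.mem_append_left _ hp)
    have hx := h x (by simp)
    have kf1 : ∀ y ∈ l.filter (fun p => p.2 == (1 : Int)), y.2 = 1 := by
      intro y hy; simp only [List.mem_filter, beq_iff_eq] at hy; exact hy.2
    have kf2 : ∀ y ∈ l.filter (fun p => p.2 == (2 : Int)), y.2 = 2 := by
      intro y hy; simp only [List.mem_filter, beq_iff_eq] at hy; exact hy.2
    have kf3 : ∀ y ∈ l.filter (fun p => p.2 == (3 : Int)), y.2 = 3 := by
      intro y hy; simp only [List.mem_filter, beq_iff_eq] at hy; exact hy.2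
    rw [PySem.List.sorted_eq_foldl_insertBy, List.foldl_append, List.foldl_cons, List.foldl_nil,
        ← PySem.List.sorted_eq_foldl_insertBy, ih hl]
    simp only [List.filter_append, List.filter_cons, List.filter_nil]
    rcases hx with h1 | h2 | h3
    · rw [List.append_assoc,
          pv_insertBy_append_left _ _ _ _
            (by intro y hy; simp [kf1 y hy, h1]),
          pv_insertBy_all_before _ _ _
            (by intro y hy
                rcases List.mem_append.mp hy with hy | hy
                · simp [kf2 y hy, h1]
                · simp [kf3 y hy, h1])]
      simp [h1]
    · rw [pv_insertBy_append_left _ _ _ _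
            (by intro y hy
                rcases List.mem_append.mp hy with hy | hy
                · simp [kf1 y hy, h2]
                · simp [kf2 y hy, h2]),
          pv_insertBy_all_before _ _ _
            (by intro y hy; simp [kf3 y hy, h2])]
      simp [h2]
    · rw [PySem.List.insertBy_of_forall_not_before _ _ _
            (by intro y hy
                rcases List.mem_append.mp hy with hy | hy
                · rcases List.mem_append.mp hy with hy | hy
                  · simp [kf1 y hy, h3]
                  · simp [kf2 y hy, h3]
                · simp [kf3 y hy, h3])]
      simp [h3]

lemma pvCand_cons_true (p : String × String) (l : List (String × String))
    (h : (pvPriority.contains p.2 && !pvIsExcluded p.1) = true) :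
    pvCand (p :: l) = (p.1, pvPriority.getD p.2 0) :: pvCand l := by
  simp only [pvCand, List.filterMap_cons]
  rw [if_pos h]

lemma pvCand_cons_false (p : String × String) (l : List (String × String))
    (h : (pvPriority.contains p.2 && !pvIsExcluded p.1) = false) :
    pvCand (p :: l) = pvCand l := by
  simp only [pvCand, List.filterMap_cons]
  rw [if_neg (by rw [h]; exact Bool.false_ne_true)]

-- every candidate's priority is 1, 2 or 3
lemma pv_cand_keys (l : List (String × String)) :
    ∀ p ∈ pvCand l, p.2 = 1 ∨ p.2 = 2 ∨ p.2 = 3 := by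
  intro p hp
  simp only [pvCand, List.mem_filterMap] at hp
  obtain ⟨q, _, hg⟩ := hp
  by_cases hc : (pvPriority.contains q.2 && !pvIsExcluded q.1) = true
  · rw [if_pos hc] at hg
    have hcc : pvPriority.contains q.2 = true := by
      simp only [Bool.and_eq_true] at hc; exact hc.1
    have hPP : pvPriority
        = (⟨[("DATE", (1 : Int)), ("DATETIME", 2), ("TIMESTAMP", 3)]⟩ : PySem.Dict String Int) := by
      decide
    rw [hPP, PySem.Dict.contains_mk] at hcc
    simp only [List.any_cons, List.any_nil, Bool.or_false, Bool.or_eq_true, beq_iff_eq] at hcc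
    have hp' := Option.some.inj hg
    have hp2 : p.2 = pvPriority.getD q.2 0 := by rw [← hp']
    rcases hcc with h | h | h <;> rw [← h] at hp2 <;> rw [hPP] at hp2
    · left; rw [hp2]; decide
    · right; left; rw [hp2]; decide
    · right; right; rw [hp2]; decide
  · rw [if_neg hc] at hg; cases hg

-- Python's find-first as head-of-filter
lemma pv_find?_eq_head?_filter {α : Type} (q : α → Bool) (l : List α) :
    l.find? q = (l.filter q).head? := by
  induction l with
  | nil => rfl
  | cons a t ih =>
    cases h : q a
    · rw [List.find?_cons_of_neg (by simp [h]), List.filter_cons_of_neg (by simp [h]), ih]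
    · rw [List.find?_cons_of_pos h, List.filter_cons_of_pos h]
      rfl

lemma pv_cand_filter_DATE (l : List (String × String)) :
    (pvCand l).filter (fun p => p.2 == (1 : Int)) =
      (l.filter (fun p => p.2 == "DATE" && pvUsable p.1)).map (fun p => (p.1, (1 : Int))) := by
  induction l with
  | nil => rfl
  | cons p l ih =>
    by_cases hD : p.2 = "DATE"
    · have hg : pvPriority.getD "DATE" 0 = (1 : Int) := by decide
      cases hu : pvUsable p.1
      · have he : pvIsExcluded p.1 = true := by rw [pv_excl_eq, hu]; rfl
        have hcond : (pvPriority.contains p.2 && !pvIsExcluded p.1) = false := by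
          rw [he]; simp
        rw [pvCand_cons_false _ _ hcond, List.filter_cons]
        simp [hD, hu, ih]
      · have he : pvIsExcluded p.1 = false := by rw [pv_excl_eq, hu]; rfl
        have hcond : (pvPriority.contains p.2 && !pvIsExcluded p.1) = true := by
          rw [hD, he]; decide
        rw [pvCand_cons_true _ _ hcond, List.filter_cons, List.filter_cons]
        simp [hD, hg, hu, ih]
    by_cases hT : p.2 = "DATETIME"
    · have hg : pvPriority.getD "DATETIME" 0 = (2 : Int) := by decide
      cases hu : pvUsable p.1
      · have he : pvIsExcluded p.1 = true := by rw [pv_excl_eq, hu]; rfl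
        have hcond : (pvPriority.contains p.2 && !pvIsExcluded p.1) = false := by
          rw [he]; simp
        rw [pvCand_cons_false _ _ hcond, List.filter_cons]
        simp [hT, hu, ih]
      · have he : pvIsExcluded p.1 = false := by rw [pv_excl_eq, hu]; rfl
        have hcond : (pvPriority.contains p.2 && !pvIsExcluded p.1) = true := by
          rw [hT, he]; decide
        rw [pvCand_cons_true _ _ hcond, List.filter_cons, List.filter_cons]
        simp [hT, hg, hu, ih]
    by_cases hS : p.2 = "TIMESTAMP"
    · have hg : pvPriority.getD "TIMESTAMP" 0 = (3 : Int) := by decide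
      cases hu : pvUsable p.1
      · have he : pvIsExcluded p.1 = true := by rw [pv_excl_eq, hu]; rfl
        have hcond : (pvPriority.contains p.2 && !pvIsExcluded p.1) = false := by
          rw [he]; simp
        rw [pvCand_cons_false _ _ hcond, List.filter_cons]
        simp [hS, hu, ih]
      · have he : pvIsExcluded p.1 = false := by rw [pv_excl_eq, hu]; rfl
        have hcond : (pvPriority.contains p.2 && !pvIsExcluded p.1) = true := by
          rw [hS, he]; decide
        rw [pvCand_cons_true _ _ hcond, List.filter_cons, List.filter_cons]
        simp [hS, hg, hu, ih]
    have hD' : "DATE" ≠ p.2 := fun h => hD h.symm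
    have hT' : "DATETIME" ≠ p.2 := fun h => hT h.symm
    have hS' : "TIMESTAMP" ≠ p.2 := fun h => hS h.symm
    have hPP : pvPriority
        = (⟨[("DATE", (1 : Int)), ("DATETIME", 2), ("TIMESTAMP", 3)]⟩ : PySem.Dict String Int) := by
      decide
    have hcont : pvPriority.contains p.2 = false := by
      rw [hPP, PySem.Dict.contains_mk]
      simp [hD', hT', hS']
    have hcond : (pvPriority.contains p.2 && !pvIsExcluded p.1) = false := by
      rw [hcont]; simp
    rw [pvCand_cons_false _ _ hcond, List.filter_cons]
    simp [hD, hT, hS, ih]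

lemma pv_cand_filter_DATETIME (l : List (String × String)) :
    (pvCand l).filter (fun p => p.2 == (2 : Int)) =
      (l.filter (fun p => p.2 == "DATETIME" && pvUsable p.1)).map (fun p => (p.1, (2 : Int))) := by
  induction l with
  | nil => rfl
  | cons p l ih =>
    by_cases hD : p.2 = "DATE"
    · have hg : pvPriority.getD "DATE" 0 = (1 : Int) := by decide
      cases hu : pvUsable p.1
      · have he : pvIsExcluded p.1 = true := by rw [pv_excl_eq, hu]; rfl
        have hcond : (pvPriority.contains p.2 && !pvIsExcluded p.1) = false := by
          rw [he]; simp
        rw [pvCand_cons_false _ _ hcond, List.filter_cons]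
        simp [hD, hu, ih]
      · have he : pvIsExcluded p.1 = false := by rw [pv_excl_eq, hu]; rfl
        have hcond : (pvPriority.contains p.2 && !pvIsExcluded p.1) = true := by
          rw [hD, he]; decide
        rw [pvCand_cons_true _ _ hcond, List.filter_cons, List.filter_cons]
        simp [hD, hg, hu, ih]
    by_cases hT : p.2 = "DATETIME"
    · have hg : pvPriority.getD "DATETIME" 0 = (2 : Int) := by decide
      cases hu : pvUsable p.1
      · have he : pvIsExcluded p.1 = true := by rw [pv_excl_eq, hu]; rfl
        have hcond : (pvPriority.contains p.2 && !pvIsExcluded p.1) = false := by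
          rw [he]; simp
        rw [pvCand_cons_false _ _ hcond, List.filter_cons]
        simp [hT, hu, ih]
      · have he : pvIsExcluded p.1 = false := by rw [pv_excl_eq, hu]; rfl
        have hcond : (pvPriority.contains p.2 && !pvIsExcluded p.1) = true := by
          rw [hT, he]; decide
        rw [pvCand_cons_true _ _ hcond, List.filter_cons, List.filter_cons]
        simp [hT, hg, hu, ih]
    by_cases hS : p.2 = "TIMESTAMP"
    · have hg : pvPriority.getD "TIMESTAMP" 0 = (3 : Int) := by decide
      cases hu : pvUsable p.1
      · have he : pvIsExcluded p.1 = true := by rw [pv_excl_eq, hu]; rfl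
        have hcond : (pvPriority.contains p.2 && !pvIsExcluded p.1) = false := by
          rw [he]; simp
        rw [pvCand_cons_false _ _ hcond, List.filter_cons]
        simp [hS, hu, ih]
      · have he : pvIsExcluded p.1 = false := by rw [pv_excl_eq, hu]; rfl
        have hcond : (pvPriority.contains p.2 && !pvIsExcluded p.1) = true := by
          rw [hS, he]; decide
        rw [pvCand_cons_true _ _ hcond, List.filter_cons, List.filter_cons]
        simp [hS, hg, hu, ih]
    have hD' : "DATE" ≠ p.2 := fun h => hD h.symm
    have hT' : "DATETIME" ≠ p.2 := fun h => hT h.symm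
    have hS' : "TIMESTAMP" ≠ p.2 := fun h => hS h.symm
    have hPP : pvPriority
        = (⟨[("DATE", (1 : Int)), ("DATETIME", 2), ("TIMESTAMP", 3)]⟩ : PySem.Dict String Int) := by
      decide
    have hcont : pvPriority.contains p.2 = false := by
      rw [hPP, PySem.Dict.contains_mk]
      simp [hD', hT', hS']
    have hcond : (pvPriority.contains p.2 && !pvIsExcluded p.1) = false := by
      rw [hcont]; simp
    rw [pvCand_cons_false _ _ hcond, List.filter_cons]
    simp [hD, hT, hS, ih]

lemma pv_cand_filter_TIMESTAMP (l : List (String × String)) :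
    (pvCand l).filter (fun p => p.2 == (3 : Int)) =
      (l.filter (fun p => p.2 == "TIMESTAMP" && pvUsable p.1)).map (fun p => (p.1, (3 : Int))) := by
  induction l with
  | nil => rfl
  | cons p l ih =>
    by_cases hD : p.2 = "DATE"
    · have hg : pvPriority.getD "DATE" 0 = (1 : Int) := by decide
      cases hu : pvUsable p.1
      · have he : pvIsExcluded p.1 = true := by rw [pv_excl_eq, hu]; rfl
        have hcond : (pvPriority.contains p.2 && !pvIsExcluded p.1) = false := by
          rw [he]; simp
        rw [pvCand_cons_false _ _ hcond, List.filter_cons]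
        simp [hD, hu, ih]
      · have he : pvIsExcluded p.1 = false := by rw [pv_excl_eq, hu]; rfl
        have hcond : (pvPriority.contains p.2 && !pvIsExcluded p.1) = true := by
          rw [hD, he]; decide
        rw [pvCand_cons_true _ _ hcond, List.filter_cons, List.filter_cons]
        simp [hD, hg, hu, ih]
    by_cases hT : p.2 = "DATETIME"
    · have hg : pvPriority.getD "DATETIME" 0 = (2 : Int) := by decide
      cases hu : pvUsable p.1
      · have he : pvIsExcluded p.1 = true := by rw [pv_excl_eq, hu]; rfl
        have hcond : (pvPriority.contains p.2 && !pvIsExcluded p.1) = false := by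
          rw [he]; simp
        rw [pvCand_cons_false _ _ hcond, List.filter_cons]
        simp [hT, hu, ih]
      · have he : pvIsExcluded p.1 = false := by rw [pv_excl_eq, hu]; rfl
        have hcond : (pvPriority.contains p.2 && !pvIsExcluded p.1) = true := by
          rw [hT, he]; decide
        rw [pvCand_cons_true _ _ hcond, List.filter_cons, List.filter_cons]
        simp [hT, hg, hu, ih]
    by_cases hS : p.2 = "TIMESTAMP"
    · have hg : pvPriority.getD "TIMESTAMP" 0 = (3 : Int) := by decide
      cases hu : pvUsable p.1
      · have he : pvIsExcluded p.1 = true := by rw [pv_excl_eq, hu]; rfl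
        have hcond : (pvPriority.contains p.2 && !pvIsExcluded p.1) = false := by
          rw [he]; simp
        rw [pvCand_cons_false _ _ hcond, List.filter_cons]
        simp [hS, hu, ih]
      · have he : pvIsExcluded p.1 = false := by rw [pv_excl_eq, hu]; rfl
        have hcond : (pvPriority.contains p.2 && !pvIsExcluded p.1) = true := by
          rw [hS, he]; decide
        rw [pvCand_cons_true _ _ hcond, List.filter_cons, List.filter_cons]
        simp [hS, hg, hu, ih]
    have hD' : "DATE" ≠ p.2 := fun h => hD h.symm
    have hT' : "DATETIME" ≠ p.2 := fun h => hT h.symm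
    have hS' : "TIMESTAMP" ≠ p.2 := fun h => hS h.symm
    have hPP : pvPriority
        = (⟨[("DATE", (1 : Int)), ("DATETIME", 2), ("TIMESTAMP", 3)]⟩ : PySem.Dict String Int) := by
      decide
    have hcont : pvPriority.contains p.2 = false := by
      rw [hPP, PySem.Dict.contains_mk]
      simp [hD', hT', hS']
    have hcond : (pvPriority.contains p.2 && !pvIsExcluded p.1) = false := by
      rw [hcont]; simp
    rw [pvCand_cons_false _ _ hcond, List.filter_cons]
    simp [hD, hT, hS, ih]

-- head of A's sorted candidate list = B's tiered first match, for any items list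
lemma pv_main_eq (l : List (String × String)) :
    (match PySem.List.sorted (pvCand l) (fun x => x.2) with
     | [] => none
     | c :: _ => some c.1) =
    ["DATE", "DATETIME", "TIMESTAMP"].findSome? (fun tier =>
      (l.find? (fun p => p.2 == tier && pvUsable p.1)).map (fun p => p.1)) := by
  rw [pv_sorted_decomp _ (pv_cand_keys l),
      pv_cand_filter_DATE l, pv_cand_filter_DATETIME l, pv_cand_filter_TIMESTAMP l]
  simp only [List.findSome?_cons, List.findSome?_nil, pv_find?_eq_head?_filter]
  cases h1 : l.filter (fun p => p.2 == "DATE" && pvUsable p.1) <;>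
    cases h2 : l.filter (fun p => p.2 == "DATETIME" && pvUsable p.1) <;>
    cases h3 : l.filter (fun p => p.2 == "TIMESTAMP" && pvUsable p.1) <;>
    simp

-- ===== VERDICT (by name: the statement is the Claim_ definition above) =====
theorem detect_date_col_spec : Claim_equal_detect_date_col := by
  intro bq_schema _
  unfold Spec_detect_date_col
  simp only [detect_date_col, detect_date_col_alt]
  rw [pv_ts_eq]
  cases hpdt : (PySem.Dict.ofList bq_schema : PySem.Dict String String).contains "pdt"
  · simp only [hpdt, Bool.false_eq_true, if_false]
    cases hts : ((PySem.Dict.ofList bq_schema : PySem.Dict String String).get? "timestamp"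
        == some "TIMESTAMP")
    · simp only [hts, Bool.false_eq_true, if_false]
      exact pv_main_eq _
    · simp only [hts, if_true]
  · simp only [hpdt, if_true]
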